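-- pv_equiv track=rewrite | github.com/sanskrit/learnsanskrit.org | api/db_scripts/add_dhaval.py | num_agama
-- ===== SOURCE A (Python) =====
-- CONSONANTS = "kKgGNcCjJYwWqQRtTdDnpPbBmyrlvSzsh"
--
-- def num_agama(dhatu: str) -> str:
--     vargas = ["kKgGN", "cCjJY", "wWqQR", "tTdDn", "pPbBm", "yrlvSzshM"]
--
--     buf = []
--     # Iterate in reverse to get vowel following vowel
--     for L in dhatu[::-1]:
--         if L in CONSONANTS:
--             buf.append(L)
--         else:
--             assert buf
--             next = buf[-1]
--             for varga in vargas: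
--                 if next in varga:
--                     buf.append(varga[-1])
--             buf.append(L)
--     return "".join(buf[::-1])
-- ===== SOURCE B (Python) =====
-- CONSONANTS = "kKgGNcCjJYwWqQRtTdDnpPbBmyrlvSzsh"
--
-- _VARGAS = ["kKgGN", "cCjJY", "wWqQR", "tTdDn", "pPbBm", "yrlvSzshM"]
-- NASALS = {c: varga[-1] for varga in _VARGAS for c in varga}
--
-- def num_agama(dhatu: str) -> str:
--     cs = list(dhatu)
--     out = []
--     # Forward pass with one-character lookahead instead of a reverse pass with buf[-1].
--     for c, nxt in zip(cs, cs[1:] + [None]):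
--         if c in CONSONANTS:
--             out.append(c)
--         else:
--             assert nxt is not None
--             out.append(c)
--             nasal = NASALS.get(nxt)
--             if nasal is not None:
--                 out.append(nasal)
--     return "".join(out)
-- ===== Notes on version B (the rewrite author's own statement) =====
-- stated objective: alternative
-- what changed: Single forward pass with one-character lookahead and a precomputed consonant-to-nasal dict, instead of A's reverse pass that looks behind via buf[-1] and scans all six varga strings for every vowel.
import Mathlib
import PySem

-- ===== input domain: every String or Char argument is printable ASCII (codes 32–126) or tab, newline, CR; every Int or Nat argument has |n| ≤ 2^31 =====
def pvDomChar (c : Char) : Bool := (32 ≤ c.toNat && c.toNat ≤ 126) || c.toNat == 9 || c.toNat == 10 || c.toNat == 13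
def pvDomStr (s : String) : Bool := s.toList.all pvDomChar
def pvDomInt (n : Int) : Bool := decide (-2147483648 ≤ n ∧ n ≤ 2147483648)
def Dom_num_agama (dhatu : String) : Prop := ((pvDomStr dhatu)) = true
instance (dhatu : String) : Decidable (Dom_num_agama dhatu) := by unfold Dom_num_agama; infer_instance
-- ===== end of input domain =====

-- B replaces A's reverse pass (lookbehind via buf[-1], per-vowel varga scan) by a forward pass
-- with one-character lookahead and a precomputed consonant→nasal dict; same return value everywhere.

-- ===== PORT A =====
def pvConsonants : List Char := "kKgGNcCjJYwWqQRtTdDnpPbBmyrlvSzsh".toList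

def pvVargas : List String := ["kKgGN", "cCjJY", "wWqQR", "tTdDn", "pPbBm", "yrlvSzshM"]

-- one iteration of A's loop body (buf is the accumulator, L the current character)
def pvStepA (buf : List Char) (L : Char) : List Char :=
  if L ∈ pvConsonants then buf ++ [L]
  else
    -- `assert buf` raises on empty buf; those inputs are excluded by Pre_ (default is never hit inside Pre_)
    let next := buf.getLast?.getD ' '
    let buf := pvVargas.foldl (fun b varga =>
      if next ∈ varga.toList then b ++ [varga.toList.getLast?.getD ' '] else b) buf
    buf ++ [L]

def num_agama (dhatu : String) : String :=
  -- dhatu[::-1] is the reversed character list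
  String.ofList ((dhatu.toList.reverse.foldl pvStepA ([] : List Char)).reverse)

-- ===== PORT B =====
-- NASALS = {c: varga[-1] for varga in _VARGAS for c in varga}
def pvNasals : PySem.Dict Char Char :=
  pvVargas.foldl (fun d varga =>
    varga.toList.foldl (fun d c => d.insert c (varga.toList.getLast?.getD ' ')) d) PySem.Dict.empty

-- one iteration of B's loop body over the zipped (char, lookahead) pairs
def pvStepB (out : List Char) (p : Char × Option Char) : List Char :=
  if p.1 ∈ pvConsonants then out ++ [p.1]
  else
    -- `assert nxt is not None` raises when the lookahead is missing; excluded by Pre_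
    match p.2 with
    | none => out ++ [p.1]
    | some nxt =>
      let out := out ++ [p.1]
      match pvNasals.get? nxt with
      | some nasal => out ++ [nasal]
      | none => out

def num_agama_alt (dhatu : String) : String :=
  let cs := dhatu.toList
  -- zip(cs, cs[1:] + [None])
  String.ofList ((cs.zip ((cs.drop 1).map some ++ [none])).foldl pvStepB ([] : List Char))

-- ===== PRECONDITION & SPEC =====
-- Pre_ excludes exactly the inputs where A raises AssertionError (a non-empty dhatu whose last
-- character is not a consonant); B raises there too.
def Pre_num_agama (dhatu : String) : Prop :=
  dhatu.toList ≠ [] → dhatu.toList.getLast?.getD ' ' ∈ pvConsonants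
instance (dhatu : String) : Decidable (Pre_num_agama dhatu) := by unfold Pre_num_agama; infer_instance

def pvWitness_num_agama : String := "gam"

def Spec_num_agama (dhatu : String) (out : String) : Prop := out = num_agama_alt dhatu
instance (dhatu : String) (out : String) : Decidable (Spec_num_agama dhatu out) := by unfold Spec_num_agama; infer_instance

-- ===== CLAIM (what is proved, stated in full; the proofs are below) =====
def Claim_equal_num_agama : Prop := ∀ (dhatu : String), Dom_num_agama dhatu → Pre_num_agama dhatu → Spec_num_agama dhatu (num_agama dhatu)

-- ===== LEMMAS AND PROOFS =====

-- A's buf, written as a foldr over the original (unreversed) list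
def pvBufA (l : List Char) : List Char := l.foldr (fun L buf => pvStepA buf L) []

-- the nasal characters A's inner varga loop appends for a given following character
def pvNasListA (d : Char) : List Char :=
  pvVargas.foldl (fun b varga =>
    if d ∈ varga.toList then b ++ [varga.toList.getLast?.getD ' '] else b) []

lemma pvStepA_getLast (buf : List Char) (L : Char) : (pvStepA buf L).getLast? = some L := by
  unfold pvStepA
  split <;> simp

lemma pvBufA_getLast (l : List Char) : (pvBufA l).getLast? = l.head? := by
  cases l with
  | nil => rfl
  | cons c rest => simp [pvBufA, pvStepA_getLast]

lemma pvVarga_fold (b : List Char) (d : Char) :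
    pvVargas.foldl (fun b varga =>
      if d ∈ varga.toList then b ++ [varga.toList.getLast?.getD ' '] else b) b
      = b ++ pvNasListA d := by
  unfold pvNasListA pvVargas
  simp only [List.foldl]
  split_ifs <;> simp

lemma pvNas_eq (d : Char) : pvNasListA d = (pvNasals.get? d).toList := by
  by_cases h : d ∈ (['k', 'K', 'g', 'G', 'N', 'c', 'C', 'j', 'J', 'Y', 'w', 'W', 'q', 'Q', 'R', 't', 'T', 'd', 'D', 'n', 'p', 'P', 'b', 'B', 'm', 'y', 'r', 'l', 'v', 'S', 'z', 's', 'h', 'M'] : List Char)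
  · fin_cases h <;> decide
  · simp only [List.mem_cons, List.not_mem_nil, or_false, not_or] at h
    obtain ⟨h1,h2,h3,h4,h5,h6,h7,h8,h9,h10,h11,h12,h13,h14,h15,h16,h17,
      h18,h19,h20,h21,h22,h23,h24,h25,h26,h27,h28,h29,h30,h31,h32,h33,h34⟩ := h
    have hd : pvNasals = PySem.Dict.mk [('k', 'N'), ('K', 'N'), ('g', 'N'), ('G', 'N'), ('N', 'N'), ('c', 'Y'), ('C', 'Y'), ('j', 'Y'), ('J', 'Y'), ('Y', 'Y'), ('w', 'R'), ('W', 'R'), ('q', 'R'), ('Q', 'R'), ('R', 'R'), ('t', 'n'), ('T', 'n'), ('d', 'n'), ('D', 'n'), ('n', 'n'), ('p', 'm'), ('P', 'm'), ('b', 'm'), ('B', 'm'), ('m', 'm'), ('y', 'M'), ('r', 'M'), ('l', 'M'), ('v', 'M'), ('S', 'M'), ('z', 'M'), ('s', 'M'), ('h', 'M'), ('M', 'M')] := by decide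
    have hv : pvNasals.get? d = none := by
      simp [hd, PySem.Dict.get?, beq_iff_eq, Ne.symm h1, Ne.symm h2, Ne.symm h3, Ne.symm h4, Ne.symm h5, Ne.symm h6, Ne.symm h7, Ne.symm h8, Ne.symm h9, Ne.symm h10, Ne.symm h11, Ne.symm h12, Ne.symm h13, Ne.symm h14, Ne.symm h15, Ne.symm h16, Ne.symm h17, Ne.symm h18, Ne.symm h19, Ne.symm h20, Ne.symm h21, Ne.symm h22, Ne.symm h23, Ne.symm h24, Ne.symm h25, Ne.symm h26, Ne.symm h27, Ne.symm h28, Ne.symm h29, Ne.symm h30, Ne.symm h31, Ne.symm h32, Ne.symm h33, Ne.symm h34]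
    rw [hv]
    simp [pvNasListA, pvVargas, List.foldl,
      h1, h2, h3, h4, h5, h6, h7, h8, h9, h10, h11, h12, h13, h14, h15, h16, h17,
      h18, h19, h20, h21, h22, h23, h24, h25, h26, h27, h28, h29, h30, h31, h32, h33, h34]

lemma pvStepB_shift (out : List Char) (p : Char × Option Char) :
    pvStepB out p = out ++ pvStepB [] p := by
  unfold pvStepB
  split
  · simp
  · cases p.2 with
    | none => simp
    | some nxt => cases hn : pvNasals.get? nxt <;> simp [hn]

lemma pvFoldB_flat (zs : List (Char × Option Char)) :
    zs.foldl pvStepB [] = zs.flatMap (pvStepB []) := by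
  refine (PySem.List.foldl_congr_mem zs pvStepB (fun out p => out ++ pvStepB [] p) []
    (fun acc x _ => pvStepB_shift acc x)).trans ?_
  rw [PySem.List.foldl_append_eq_flatMap]
  simp

lemma pvZip_cons (c : Char) (rest : List Char) :
    (c :: rest).zip (rest.map some ++ [none])
      = (c, rest.head?) :: rest.zip ((rest.drop 1).map some ++ [none]) := by
  cases rest <;> simp

lemma pvMain (l : List Char) :
    (pvBufA l).reverse = (l.zip ((l.drop 1).map some ++ [none])).flatMap (pvStepB []) := by
  induction l with
  | nil => rfl
  | cons c rest ih =>
    rw [show (c :: rest).drop 1 = rest from rfl, pvZip_cons, List.flatMap_cons, ← ih]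
    show (pvStepA (pvBufA rest) c).reverse = _
    unfold pvStepA
    split
    · next h => simp [pvStepB, h]
    · next h =>
      simp only [pvVarga_fold, pvBufA_getLast]
      cases hr : rest.head? with
      | none =>
        simp [pvStepB, h, show pvNasListA ' ' = [] from rfl]
      | some d =>
        rw [show (Option.some d).getD ' ' = d from rfl, pvNas_eq]
        cases hn : pvNasals.get? d <;> simp [pvStepB, h, hn]

-- ===== VERDICT (by name: the statement is the Claim_ definition above) =====
theorem num_agama_spec : Claim_equal_num_agama := by
  intro dhatu _ _
  show String.ofList ((dhatu.toList.reverse.foldl pvStepA []).reverse)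
      = String.ofList ((dhatu.toList.zip ((dhatu.toList.drop 1).map some ++ [none])).foldl pvStepB [])
  rw [List.foldl_reverse, pvFoldB_flat]
  show String.ofList (pvBufA dhatu.toList).reverse = _
  rw [pvMain]
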